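-- pv_equiv track=rewrite | github.com/MenghanLiu212/RL-RNA | util/pseudo_decomposition.py | HasBranch
-- ===== SOURCE A (Python) =====
-- def HasBranch(DP):
--     left_start = 0
--     right_end = len(DP)
--     for i in range(len(DP)):
--         if DP[i] == "(":
--             if i > left_start:
--                 left_start = i
--         elif DP[i] == ")":
--             if i < right_end:
--                 right_end = i
--
--
--     if left_start < right_end:
--         return 0
--     else:
--         return 1
-- ===== SOURCE B (Python) =====
-- def HasBranch(DP):
--     j = DP.find(')')
--     if j == -1:
--         return 0
--     if j == 0:
--         return 1
--     return 1 if '(' in DP[j:] else 0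
-- ===== Notes on version B (the rewrite author's own statement) =====
-- stated objective: simpler
-- what changed: Replaces the index loop maintaining two running extrema (last open-bracket index with default 0, first close-bracket index with default len) by an early-return chain: find the first close bracket and answer by whether an open bracket occurs at or after it.
-- intended difference: On the empty string A returns 1 (its leftover defaults give 0 < 0 = False), while B returns 0, the intended value since an empty string contains no branch. — e.g. on HasBranch(""): A returns 1, B returns 0
import Mathlib
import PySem

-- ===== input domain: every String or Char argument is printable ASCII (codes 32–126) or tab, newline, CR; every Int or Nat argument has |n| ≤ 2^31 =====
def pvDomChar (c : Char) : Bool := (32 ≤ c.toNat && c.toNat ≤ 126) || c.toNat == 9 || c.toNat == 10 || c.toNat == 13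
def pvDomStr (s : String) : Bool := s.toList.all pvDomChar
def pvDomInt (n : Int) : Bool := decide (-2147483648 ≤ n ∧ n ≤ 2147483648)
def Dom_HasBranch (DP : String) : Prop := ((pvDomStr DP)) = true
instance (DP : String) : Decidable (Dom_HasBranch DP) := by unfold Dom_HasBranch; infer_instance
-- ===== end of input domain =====

-- B replaces A's index loop maintaining two running extrema by an early-return chain on the
-- first close bracket and a membership test in the suffix after it (simpler; measured faster
-- in Python by a constant factor: str.find and 'in' instead of a per-character loop).

-- ===== PORT A =====
-- Literal port of A: loop i over range(len(DP)) updating (left_start, right_end);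
-- DP[i] is always in range in this loop, so pyGetD with an unused default is exact.
def HasBranch (DP : String) : Int :=
  let cs := DP.toList
  let st :=
    (PySem.List.pyRange 0 (PySem.Str.len DP) 1).foldl
      (fun (st : Int × Int) i =>
        let c := PySem.List.pyGetD cs i ' '
        if c = '(' then (if i > st.1 then (i, st.2) else st)
        else if c = ')' then (if i < st.2 then (st.1, i) else st)
        else st)
      (0, PySem.Str.len DP)
  if st.1 < st.2 then 0 else 1

-- ===== PORT B =====
def HasBranch_alt (DP : String) : Int :=
  let j := PySem.Str.find DP ")"
  if j = -1 then 0
  else if j = 0 then 1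
  else if PySem.Str.isIn "(" (PySem.Str.slice DP (some j) none) then 1 else 0

-- ===== PRECONDITION & SPEC =====
-- On the empty string A returns 1 (its leftover defaults give 0 < 0 = False), while B returns 0,
-- the intended value since an empty string contains no branch.
def D_HasBranch (DP : String) : Prop := DP = ""
instance (DP : String) : Decidable (D_HasBranch DP) := by unfold D_HasBranch; infer_instance

def Spec_HasBranch (DP : String) (out : Int) : Prop := ¬ D_HasBranch DP → out = HasBranch_alt DP
instance (DP : String) (out : Int) : Decidable (Spec_HasBranch DP out) := by unfold Spec_HasBranch; infer_instance

def pvDiffWitness_HasBranch : String := ""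
def pvDiffWitnessOut_HasBranch : Int × Int := (1, 0)

-- ===== CLAIM (what is proved, stated in full; the proofs are below) =====
def Claim_unchanged_HasBranch : Prop := ∀ (DP : String), Dom_HasBranch DP → Spec_HasBranch DP (HasBranch DP)
def Claim_changed_HasBranch : Prop := Dom_HasBranch (pvDiffWitness_HasBranch) ∧ D_HasBranch (pvDiffWitness_HasBranch) ∧ HasBranch (pvDiffWitness_HasBranch) = pvDiffWitnessOut_HasBranch.1 ∧ HasBranch_alt (pvDiffWitness_HasBranch) = pvDiffWitnessOut_HasBranch.2 ∧ pvDiffWitnessOut_HasBranch.1 ≠ pvDiffWitnessOut_HasBranch.2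
def Claim_exact_HasBranch : Prop := ∀ (DP : String), Dom_HasBranch DP → D_HasBranch DP → HasBranch DP ≠ HasBranch_alt DP

-- ===== LEMMAS AND PROOFS =====

-- index of the LAST '(' in cs, as A's loop tracks it
def loA : List Char → Option Nat
  | [] => none
  | c :: t =>
    match loA t with
    | some k => some (k + 1)
    | none => if c = '(' then some 0 else none

-- index of the FIRST ')' in cs
def fcA : List Char → Option Nat
  | [] => none
  | c :: t => if c = ')' then some 0 else (fcA t).map (· + 1)

-- the body of A's loop, on an (index, char) pair
def stepA (st : Int × Int) (p : Int × Char) : Int × Int :=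
  if p.2 = '(' then (if p.1 > st.1 then (p.1, st.2) else st)
  else if p.2 = ')' then (if p.1 < st.2 then (st.1, p.1) else st)
  else st

lemma loA_lt {cs : List Char} {k : Nat} (h : loA cs = some k) : k < cs.length := by
  induction cs generalizing k with
  | nil => simp [loA] at h
  | cons c t ih =>
    rw [loA] at h
    cases hl : loA t with
    | some m => rw [hl] at h; simp at h; subst h; simpa using ih hl
    | none =>
      rw [hl] at h; split_ifs at h
      simp at h; subst h; simp

lemma fcA_lt {cs : List Char} {k : Nat} (h : fcA cs = some k) : k < cs.length := by
  induction cs generalizing k with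
  | nil => simp [fcA] at h
  | cons c t ih =>
    rw [fcA] at h
    split_ifs at h
    · simp at h; subst h; simp
    · cases hl : fcA t with
      | some m => rw [hl] at h; simp at h; subst h; simpa using ih hl
      | none => simp [hl] at h

lemma loA_none_iff {cs : List Char} : loA cs = none ↔ '(' ∉ cs := by
  induction cs with
  | nil => simp [loA]
  | cons c t ih =>
    rw [loA]
    cases hl : loA t with
    | some m =>
      simp only [reduceCtorEq, false_iff]
      have : '(' ∈ t := by
        by_contra hmem
        simp [ih.mpr hmem] at hl
      simp [this]
    | none =>
      have hnt : '(' ∉ t := ih.mp hl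
      split_ifs with hc <;> simp_all [eq_comm]

lemma fcA_none_iff {cs : List Char} : fcA cs = none ↔ ')' ∉ cs := by
  induction cs with
  | nil => simp [fcA]
  | cons c t ih =>
    rw [fcA]
    split_ifs with hc <;> simp_all [eq_comm]

lemma loA_mem_drop {cs : List Char} {k : Nat} (h : loA cs = some k) :
    ∀ m : Nat, '(' ∈ cs.drop m ↔ m ≤ k := by
  intro m
  induction cs generalizing k m with
  | nil => simp [loA] at h
  | cons c t ih =>
    rw [loA] at h
    cases hl : loA t with
    | some p =>
      rw [hl] at h; simp at h; subst h
      cases m with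
      | zero =>
        simp only [List.drop_zero, Nat.zero_le, iff_true]
        have := (ih hl 0).mpr (Nat.zero_le _)
        simp at this; simp [this]
      | succ m' => simpa using (ih hl m')
    | none =>
      rw [hl] at h
      split_ifs at h with hc
      simp at h; subst h; subst hc
      cases m with
      | zero => simp
      | succ m' =>
        have hnot : '(' ∉ t := loA_none_iff.mp hl
        simp only [List.drop_succ_cons]
        constructor
        · intro hm; exact absurd (List.mem_of_mem_drop hm) hnot
        · omega

lemma fcA_spec {cs : List Char} {k : Nat} (h : fcA cs = some k) :
    cs[k]? = some ')' ∧ ∀ j < k, cs[j]? ≠ some ')' := by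
  induction cs generalizing k with
  | nil => simp [fcA] at h
  | cons c t ih =>
    rw [fcA] at h
    split_ifs at h with hc
    · simp at h; subst h; simp [hc]
    · cases hl : fcA t with
      | some m =>
        rw [hl] at h; simp at h; subst h
        obtain ⟨h1, h2⟩ := ih hl
        refine ⟨by simpa using h1, ?_⟩
        intro j hj
        cases j with
        | zero => simpa [eq_comm] using hc
        | succ j' => simpa using h2 j' (by omega)
      | none => simp [hl] at h

lemma singleton_prefix_iff {c : Char} {l : List Char} : [c] <+: l ↔ l.head? = some c := by
  cases l with
  | nil => simp
  | cons a t => simp [List.cons_prefix_iff, eq_comm]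

-- Chars.find for the one-character pattern ")" computes exactly fcA
lemma find_close_eq_fcA (cs : List Char) :
    PySem.Chars.find cs [')'] = (fcA cs).elim (-1) (fun k => (k : Int)) := by
  cases hf : fcA cs with
  | none =>
    simp only [Option.elim]
    rw [PySem.Chars.find_eq_neg_one_iff]
    rw [List.singleton_infix_iff]
    exact fcA_none_iff.mp hf
  | some k =>
    obtain ⟨h1, h2⟩ := fcA_spec hf
    have hmem : ')' ∈ cs := by
      have hk := fcA_lt hf
      have : cs[k] = ')' := by
        have := h1; rwa [List.getElem?_eq_getElem hk, Option.some_inj] at this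
      exact this ▸ List.getElem_mem hk
    have hpos : 0 ≤ PySem.Chars.find cs [')'] := by
      have hne : PySem.Chars.find cs [')'] ≠ -1 := by
        rw [ne_eq, PySem.Chars.find_eq_neg_one_iff, List.singleton_infix_iff]
        simpa using hmem
      have := PySem.Chars.neg_one_le_find cs [')']
      omega
    obtain ⟨hpre, hmin⟩ := PySem.Chars.find_spec hpos
    set F := (PySem.Chars.find cs [')']).toNat with hF
    have hFpre : cs[F]? = some ')' := by
      rw [← List.head?_drop]
      exact singleton_prefix_iff.mp hpre
    have hFk : F = k := by
      by_contra hne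
      rcases Nat.lt_or_ge F k with hlt | hge
      · exact h2 F hlt hFpre
      · have hkF : k < F := by omega
        apply hmin k hkF
        rw [singleton_prefix_iff, List.head?_drop]
        exact h1
    simp only [Option.elim]
    omega

lemma stepA_eq (a b s : Int) (c : Char) :
    stepA (a, b) (s, c) = ((if c = '(' then max a s else a), (if c = ')' then min b s else b)) := by
  simp only [stepA]
  split_ifs <;> simp_all <;> omega

-- A's loop, run from start index s with state (a, b), a ≤ s: it computes the
-- clipped last-'(' and first-')' indices of the remaining segment.
lemma foldA_char (cs : List Char) : ∀ (s a b : Int), a ≤ s →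
    (PySem.List.enumerate cs s).foldl stepA (a, b)
      = ((loA cs).elim a (fun k => max a (s + k)), (fcA cs).elim b (fun k => min b (s + k))) := by
  induction cs with
  | nil => intro s a b _; simp [PySem.List.enumerate_nil, loA, fcA]
  | cons c t ih =>
    intro s a b ha
    rw [PySem.List.enumerate_cons, List.foldl_cons, stepA_eq,
      ih (s + 1) _ _ (by split_ifs <;> omega)]
    rw [loA, fcA]
    cases hl : loA t <;> cases hf : fcA t <;>
      by_cases hc1 : c = '(' <;> by_cases hc2 : c = ')' <;>
        simp_all [Option.elim, Prod.ext_iff] <;> omega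

-- evaluating both ports on a nonempty string, in terms of loA / fcA
lemma HasBranch_eval (DP : String) :
    HasBranch DP
      = (if ((loA DP.toList).elim 0 (fun k => max 0 ((0:Int) + k)))
            < ((fcA DP.toList).elim (DP.toList.length : Int) (fun k => min (DP.toList.length : Int) ((0:Int) + k)))
         then 0 else 1) := by
  unfold HasBranch
  have key := foldA_char DP.toList 0 0 (DP.toList.length : Int) (le_refl 0)
  rw [PySem.List.enumerate_eq_map_pyRange DP.toList ' ', List.foldl_map] at key
  simp only [PySem.Str.len_eq, PySem.List.len_eq] at key ⊢
  rw [show (fun (st : Int × Int) i =>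
        let c := PySem.List.pyGetD DP.toList i ' '
        if c = '(' then (if i > st.1 then (i, st.2) else st)
        else if c = ')' then (if i < st.2 then (st.1, i) else st)
        else st)
      = (fun (x : Int × Int) (y : Int) => stepA x (y, PySem.List.pyGetD DP.toList y ' ')) from rfl]
  simp only [key]

theorem HasBranch_spec_aux (DP : String) (hD : ¬ D_HasBranch DP) :
    HasBranch DP = HasBranch_alt DP := by
  have hcs : DP.toList ≠ [] := by
    unfold D_HasBranch at hD
    simpa [← String.toList_eq_nil_iff] using hD
  have hlen : 0 < DP.toList.length := List.length_pos_iff.mpr hcs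
  have hne : DP ≠ "" := by unfold D_HasBranch at hD; exact hD
  have hL : 0 < DP.length := by rw [← String.length_toList]; exact hlen
  rw [HasBranch_eval]
  unfold HasBranch_alt
  rw [PySem.Str.find_eq, show (")" : String).toList = [')'] from rfl, find_close_eq_fcA]
  cases hf : fcA DP.toList with
  | none =>
    simp only [Option.elim]
    cases hl : loA DP.toList with
    | none =>
      have h0 : ((0 : Int) < (DP.toList.length : Int)) := by exact_mod_cast hlen
      simp [hne]
    | some m =>
      have hm := loA_lt hl
      have hm' : m < DP.length := by rw [← String.length_toList]; exact hm
      simp [hm']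
  | some k =>
    have hk := fcA_lt hf
    simp only [Option.elim]
    have hne1 : ((k : Int)) ≠ -1 := by omega
    have hisInC : PySem.Chars.isIn ['('] (DP.toList.drop k) = true ↔ '(' ∈ DP.toList.drop k := by
      rw [PySem.Chars.isIn_iff_infix, List.singleton_infix_iff]
    by_cases hk0 : k = 0
    · subst hk0
      cases hl : loA DP.toList with
      | none => simp
      | some m => simp
    · have hne0 : ((k : Int)) ≠ 0 := by exact_mod_cast hk0
      cases hl : loA DP.toList with
      | none =>
        have hnot : '(' ∉ DP.toList := loA_none_iff.mp hl
        have hfalse : PySem.Chars.isIn ['('] (DP.toList.drop k) = false := by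
          rw [← Bool.not_eq_true, hisInC]
          intro hmem; exact hnot (List.mem_of_mem_drop hmem)
        simp [hne1, hfalse, hL, hk0, Nat.pos_of_ne_zero hk0]
      | some m =>
        have hm := loA_lt hl
        have hdrop := loA_mem_drop hl k
        have hm2 : m < DP.length := by rw [← String.length_toList]; exact hm
        by_cases hkm : k ≤ m
        · have htrue : PySem.Chars.isIn ['('] (DP.toList.drop k) = true := hisInC.mpr (hdrop.mpr hkm)
          simp [hne1, htrue, hk0]
          exact fun _ => hkm
        · have hfalse : PySem.Chars.isIn ['('] (DP.toList.drop k) = false := by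
            rw [← Bool.not_eq_true, hisInC, hdrop]; omega
          simp [hne1, hfalse, hk0]
          exact ⟨hm2, by omega⟩

-- ===== VERDICT (by name: the statement is the Claim_ definition above) =====
theorem HasBranch_spec : Claim_unchanged_HasBranch := by
  intro DP _ hD
  exact HasBranch_spec_aux DP hD

theorem HasBranch_changed : Claim_changed_HasBranch := by
  unfold Claim_changed_HasBranch; decide

theorem HasBranch_tight : Claim_exact_HasBranch := by
  intro DP _ hD
  unfold D_HasBranch at hD; subst hD; decide
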